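-- pv_equiv track=rewrite | github.com/micnekr/ProjectEuler | PE51.py | findNewNumbers
-- ===== SOURCE A (Python) =====
-- def findNewNumbers(string, lastIndex, filler, left):
--     if left == 0:
--         return [string]
--     if lastIndex == len(string):
--         return []
--     out = []
--     for i in range(lastIndex, len(string)):
--         newString = string[:i] + filler + string[i + 1:]
--
--         newStrings = findNewNumbers(newString, i + 1, filler, left - 1)
--         out += newStrings
--     return out
-- ===== SOURCE B (Python) =====
-- def findNewNumbers(string, lastIndex, filler, left):
--     if left < 0:
--         return []
--     frontier = [(string, lastIndex)]
--     for _ in range(left):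
--         if not frontier:
--             break
--         frontier = [(s[:i] + filler + s[i + 1:], i + 1)
--                     for (s, li) in frontier
--                     for i in range(li, len(s))]
--     return [s for (s, _) in frontier]
-- ===== Notes on version B (the rewrite author's own statement) =====
-- stated objective: alternative
-- what changed: A's depth-first recursion is replaced by an iterative breadth-first frontier: a list of (string, nextIndex) states is expanded level by level up to `left` times (stopping early when the frontier empties) and then projected to the strings.
import Mathlib
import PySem

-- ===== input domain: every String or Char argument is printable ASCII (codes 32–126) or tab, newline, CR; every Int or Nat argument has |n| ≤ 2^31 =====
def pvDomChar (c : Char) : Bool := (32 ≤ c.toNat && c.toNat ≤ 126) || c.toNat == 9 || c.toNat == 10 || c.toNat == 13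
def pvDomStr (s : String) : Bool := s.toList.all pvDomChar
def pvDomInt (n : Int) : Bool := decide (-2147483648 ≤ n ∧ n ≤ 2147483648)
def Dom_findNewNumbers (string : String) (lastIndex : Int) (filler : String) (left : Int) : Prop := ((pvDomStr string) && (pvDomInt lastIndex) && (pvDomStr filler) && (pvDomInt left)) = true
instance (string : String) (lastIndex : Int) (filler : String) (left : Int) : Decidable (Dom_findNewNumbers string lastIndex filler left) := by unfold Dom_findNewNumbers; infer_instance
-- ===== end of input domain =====

-- B replaces A's depth-first recursion by an iterative level-by-level frontier expansion (alternative
-- decomposition, same exponential cost); A mutates nothing, equivalence is about the return value.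

-- ===== PORT A =====
-- s[:i] + filler + s[i+1:], shared by both ports (identical expression in both Python sources)
def pvSubst (s : String) (i : Int) (filler : String) : String :=
  String.ofList (PySem.Chars.slice s.toList none (some i) ++ filler.toList ++ PySem.Chars.slice s.toList (some (i + 1)) none)

-- fuel makes A's recursion total in Lean: on Pre_ with 0 ≤ left the recursion depth is exactly
-- ≤ left + 1 (left decreases by 1 per level), so fuel left.toNat + 1 never runs out; on Pre_ with
-- left < 0 the Python returns [] on every terminating path and the fuel-0 base returns the same [].
def pvGoA (fuel : Nat) (string : String) (lastIndex : Int) (filler : String) (left : Int) : List String :=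
  match fuel with
  | 0 => []
  | fuel + 1 =>
    if left = 0 then [string]
    else if lastIndex = (string.toList.length : Int) then []
    else
      (PySem.List.pyRange lastIndex (string.toList.length : Int) 1).foldl
        (fun out i => out ++ pvGoA fuel (pvSubst string i filler) (i + 1) filler (left - 1)) []

def findNewNumbers (string : String) (lastIndex : Int) (filler : String) (left : Int) : List String :=
  pvGoA (left.toNat + 1) string lastIndex filler left

-- ===== PORT B =====
-- one frontier step: every (s, li) is replaced by its one-substitution successors
def pvStep (filler : String) (frontier : List (String × Int)) : List (String × Int) :=
  frontier.flatMap (fun p =>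
    (PySem.List.pyRange p.2 (p.1.toList.length : Int) 1).map (fun i => (pvSubst p.1 i filler, i + 1)))

-- the 'for _ in range(left)' loop with its 'if not frontier: break'
def pvLoop (filler : String) : Nat → List (String × Int) → List (String × Int)
  | 0, fr => fr
  | n + 1, fr => if fr.isEmpty then fr else pvLoop filler n (pvStep filler fr)

def findNewNumbers_alt (string : String) (lastIndex : Int) (filler : String) (left : Int) : List String :=
  if left < 0 then []
  else (pvLoop filler left.toNat [(string, lastIndex)]).map Prod.fst

-- ===== PRECONDITION & SPEC =====
-- Pre_ excludes exactly the inputs on which A raises RecursionError: a filler of length ≥ 2 with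
-- positions remaining (lastIndex < len(string), so the string grows at every level and the recursion
-- never runs out of positions) combined with left < 0 (left never reaches the base case, unbounded
-- depth) or left ≥ 1000 (recursion depth left + 1 exceeds CPython's recursion limit of 1000).
-- Every input on which A returns a value is admitted, including all left < 0 with a short filler or
-- no remaining positions, where A returns [] and B returns [] as well.
def Pre_findNewNumbers (string : String) (lastIndex : Int) (filler : String) (left : Int) : Prop :=
  (0 ≤ left ∧ left < 1000) ∨ filler.toList.length ≤ 1 ∨ (string.toList.length : Int) ≤ lastIndex
instance (string : String) (lastIndex : Int) (filler : String) (left : Int) : Decidable (Pre_findNewNumbers string lastIndex filler left) := by unfold Pre_findNewNumbers; infer_instance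
def pvWitness_findNewNumbers : String × Int × String × Int := ("ab", 0, "7", 1)

def Spec_findNewNumbers (string : String) (lastIndex : Int) (filler : String) (left : Int) (out : List String) : Prop := out = findNewNumbers_alt string lastIndex filler left
instance (string : String) (lastIndex : Int) (filler : String) (left : Int) (out : List String) : Decidable (Spec_findNewNumbers string lastIndex filler left out) := by unfold Spec_findNewNumbers; infer_instance

-- ===== CLAIM (what is proved, stated in full; the proofs are below) =====
def Claim_equal_findNewNumbers : Prop := ∀ (string : String) (lastIndex : Int) (filler : String) (left : Int), Dom_findNewNumbers string lastIndex filler left → Pre_findNewNumbers string lastIndex filler left → Spec_findNewNumbers string lastIndex filler left (findNewNumbers string lastIndex filler left)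

-- ===== LEMMAS AND PROOFS =====

-- the loop with its early 'break' computes plain iteration of the step (pvStep fixes [])
theorem pv_loop_eq_iterate (fil : String) (n : Nat) : ∀ (fr : List (String × Int)),
    pvLoop fil n fr = (pvStep fil)^[n] fr := by
  induction n with
  | zero => intro fr; rfl
  | succ n ih =>
    intro fr
    rw [pvLoop, Function.iterate_succ_apply]
    by_cases h : fr.isEmpty
    · rw [if_pos h]
      rw [List.isEmpty_iff.mp h]
      have hfix : pvStep fil [] = [] := rfl
      rw [hfix, Function.iterate_fixed hfix]
    · rw [if_neg h, ih]

-- the core invariant: n frontier steps, projected to the strings, are exactly A's recursion at left = n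
theorem pv_main (fil : String) (n : Nat) : ∀ (fuel : Nat), n < fuel → ∀ (fr : List (String × Int)),
    ((pvStep fil)^[n] fr).map Prod.fst = fr.flatMap (fun p => pvGoA fuel p.1 p.2 fil (n : Int)) := by
  induction n with
  | zero =>
    intro fuel hf fr
    match fuel, hf with
    | fuel + 1, _ =>
      induction fr with
      | nil => simp
      | cons a t iht => simpa [pvGoA, List.flatMap] using iht
  | succ n ih =>
    intro fuel hf fr
    match fuel, hf with
    | fuel + 1, hf =>
      have hn : n < fuel := by omega
      rw [Function.iterate_succ_apply, ih fuel hn]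
      rw [pvStep, List.flatMap_assoc]
      apply List.flatMap_congr
      intro p _
      rw [List.flatMap_map]
      show _ = pvGoA (fuel + 1) p.1 p.2 fil ((n : Int) + 1)
      rw [pvGoA]
      have hne : ((n : Int) + 1) ≠ 0 := by omega
      rw [if_neg hne]
      by_cases hli : p.2 = (p.1.toList.length : Int)
      · rw [if_pos hli, hli, PySem.List.pyRange_one_eq_nil (le_refl _)]
        simp
      · rw [if_neg hli, PySem.List.foldl_append_eq_flatMap]
        simp only [List.nil_append]
        apply List.flatMap_congr
        intro i _
        have : (n : Int) + 1 - 1 = (n : Int) := by ring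
        rw [this]

-- at fuel 1 with left ≠ 0 every recursive call is fuel-exhausted, so A's port folds only []s
theorem pv_goA_one_ne_zero (s : String) (li : Int) (fil : String) (l : Int) (hl : l ≠ 0) :
    pvGoA 1 s li fil l = [] := by
  rw [pvGoA, if_neg hl]
  by_cases hli : li = (s.toList.length : Int)
  · rw [if_pos hli]
  · rw [if_neg hli, PySem.List.foldl_append_eq_flatMap]
    simp [pvGoA]

-- ===== VERDICT (by name: the statement is the Claim_ definition above) =====
theorem findNewNumbers_spec : Claim_equal_findNewNumbers := by
  intro s li fil left _ _
  unfold Spec_findNewNumbers findNewNumbers findNewNumbers_alt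
  by_cases hneg : left < 0
  · rw [if_pos hneg]
    have h0 : left.toNat = 0 := Int.toNat_of_nonpos (le_of_lt hneg)
    rw [h0, pv_goA_one_ne_zero s li fil left (by omega)]
  · rw [if_neg hneg]
    have hpre : 0 ≤ left := not_lt.mp hneg
    have hleft : (left.toNat : Int) = left := Int.toNat_of_nonneg hpre
    rw [pv_loop_eq_iterate, pv_main fil left.toNat (left.toNat + 1) (by omega) [(s, li)]]
    simp [hleft]
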